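-- pv_equiv track=rewrite | github.com/VRuizInformatica/Python | PoniendoEnPracticaLoAprendido/Ejer020.py | es_escalonada_columnas
-- ===== SOURCE A (Python) =====
-- def es_escalonada_columnas(matriz):
--     """
--     Verifica si una matriz es escalonada en columnas.
--     """
--     numero_ceros_anterior = -1
--     num_filas = len(matriz)
--     num_columnas = len(matriz[0]) if num_filas > 0 else 0
--
--     for col in range(num_columnas):
--         numero_ceros = 0
--         for fila in range(num_filas):
--             if matriz[fila][col] == 0:
--                 numero_ceros += 1
--             else:
--                 break
--         if numero_ceros != numero_ceros_anterior + 1: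
--             return False
--         numero_ceros_anterior = numero_ceros
--     return True
-- ===== SOURCE B (Python) =====
-- def es_escalonada_columnas(matriz):
--     """
--     Verifica si una matriz es escalonada en columnas.
--     """
--     num_filas = len(matriz)
--     num_columnas = len(matriz[0]) if matriz else 0
--     if num_columnas > num_filas + 1:
--         return False
--     for i, fila in enumerate(matriz):
--         if i < num_columnas and fila[i] == 0:
--             return False
--         if any(x != 0 for x in fila[i + 1:num_columnas]):
--             return False
--     return True
-- ===== Notes on version B (the rewrite author's own statement) =====
-- stated objective: alternative
-- what changed: B replaces A's column-major scan with a threaded leading-zero counter by an upfront shape bound (num_columnas <= num_filas + 1) plus a row-major pass checking each row's diagonal entry is nonzero and its strict upper part fila[i+1:num_columnas] is all zero.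
import Mathlib
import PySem

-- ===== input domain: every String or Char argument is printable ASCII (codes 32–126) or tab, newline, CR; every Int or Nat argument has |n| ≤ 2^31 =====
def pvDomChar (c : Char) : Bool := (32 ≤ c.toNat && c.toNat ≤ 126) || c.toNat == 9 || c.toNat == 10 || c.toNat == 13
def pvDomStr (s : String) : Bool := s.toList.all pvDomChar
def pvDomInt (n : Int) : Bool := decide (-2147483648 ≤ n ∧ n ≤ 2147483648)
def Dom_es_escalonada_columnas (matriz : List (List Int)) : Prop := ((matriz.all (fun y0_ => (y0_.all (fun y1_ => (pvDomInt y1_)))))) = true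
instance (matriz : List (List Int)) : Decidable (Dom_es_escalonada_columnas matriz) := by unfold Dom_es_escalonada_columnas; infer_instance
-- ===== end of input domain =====

-- B replaces A's column-major leading-zero counter with an upfront shape bound plus a row-major
-- triangularity check (nonzero diagonal entry, zero strict upper part) — alternative decomposition, same cost.

-- ===== PORT A =====
-- inner 'for fila in range(num_filas)' over matriz[fila][col] with break: structural recursion over the rows
def pvColZerosA : List (List Int) → Int → Int
  | [], _ => 0
  | r :: rs, c => if PySem.List.pyGetD r c 0 == 0 then pvColZerosA rs c + 1 else 0

-- outer 'for col in range(num_columnas)' with early 'return False', threading numero_ceros_anterior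
def pvLoopA : List (List Int) → List Int → Int → Bool
  | _, [], _ => true
  | m, c :: cs, prev =>
    let z := pvColZerosA m c
    if z ≠ prev + 1 then false else pvLoopA m cs z

def es_escalonada_columnas (matriz : List (List Int)) : Bool :=
  let num_columnas : Int := match matriz with | [] => 0 | r :: _ => r.length
  pvLoopA matriz (PySem.List.pyRange 0 num_columnas 1) (-1)

-- ===== PORT B =====
-- 'for i, fila in enumerate(matriz)': per row, diagonal test fila[i] and super-diagonal slice fila[i+1:num_columnas]
def pvRowsB : List (List Int) → Int → Int → Bool
  | [], _, _ => true
  | fila :: rs, i, c =>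
    if i < c ∧ PySem.List.pyGetD fila i 0 = 0 then false
    else if (PySem.List.slice fila (some (i + 1)) (some c)).any (fun x => decide (x ≠ 0)) then false
    else pvRowsB rs (i + 1) c

def es_escalonada_columnas_alt (matriz : List (List Int)) : Bool :=
  let num_filas : Int := matriz.length
  let num_columnas : Int := match matriz with | [] => 0 | r :: _ => r.length
  if num_columnas > num_filas + 1 then false
  else pvRowsB matriz 0 num_columnas

-- ===== PRECONDITION & SPEC =====
-- Pre_ holds exactly on the inputs where Python A returns: it excludes the ragged matrices on which
-- some column scan, after all previous columns passed the count check, reaches a row shorter than the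
-- column index before meeting a nonzero entry — there Python A raises IndexError.
def Pre_es_escalonada_columnas (matriz : List (List Int)) : Prop :=
  ∀ j : Nat, j < (matriz.headD []).length →
    (∀ j' : Nat, j' < j →
      (j' ≤ matriz.length ∧
       (∀ k : Nat, k < j' → j' < (matriz.getD k []).length ∧ (matriz.getD k []).getD j' 0 = 0) ∧
       (j' < matriz.length → j' < (matriz.getD j' []).length ∧ (matriz.getD j' []).getD j' 0 ≠ 0))) →
    ¬ ∃ i : Nat, i < matriz.length ∧
        (∀ k : Nat, k < i → j < (matriz.getD k []).length ∧ (matriz.getD k []).getD j 0 = 0) ∧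
        (matriz.getD i []).length ≤ j
instance (matriz : List (List Int)) : Decidable (Pre_es_escalonada_columnas matriz) := by
  unfold Pre_es_escalonada_columnas; infer_instance
def pvWitness_es_escalonada_columnas : List (List Int) := [[1, 0], [0, 2]]

def Spec_es_escalonada_columnas (matriz : List (List Int)) (out : Bool) : Prop := out = es_escalonada_columnas_alt matriz
instance (matriz : List (List Int)) (out : Bool) : Decidable (Spec_es_escalonada_columnas matriz out) := by unfold Spec_es_escalonada_columnas; infer_instance

-- ===== CLAIM (what is proved, stated in full; the proofs are below) =====
def Claim_equal_es_escalonada_columnas : Prop := ∀ (matriz : List (List Int)), Dom_es_escalonada_columnas matriz → Pre_es_escalonada_columnas matriz → Spec_es_escalonada_columnas matriz (es_escalonada_columnas matriz)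

-- ===== LEMMAS AND PROOFS =====

lemma colZerosA_nonneg (rows : List (List Int)) (c : Int) : 0 ≤ pvColZerosA rows c := by
  induction rows with
  | nil => simp [pvColZerosA]
  | cons r rs ih => simp only [pvColZerosA]; split <;> omega

lemma colZerosA_le (rows : List (List Int)) (c : Int) : pvColZerosA rows c ≤ rows.length := by
  induction rows with
  | nil => simp [pvColZerosA]
  | cons r rs ih => simp only [pvColZerosA, List.length_cons]; split <;> [push_cast; push_cast] <;> omega

-- characterisation of A's per-column leading-zero count
lemma colZerosA_eq_iff (rows : List (List Int)) (j c : Nat) :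
    pvColZerosA rows (c : Int) = (j : Int) ↔
      (j ≤ rows.length ∧ (∀ k : Nat, k < j → (rows.getD k []).getD c 0 = 0) ∧
       (j < rows.length → (rows.getD j []).getD c 0 ≠ 0)) := by
  induction rows generalizing j with
  | nil =>
    simp [pvColZerosA]
    constructor
    · intro h; omega
    · intro h; omega
  | cons r rs ih =>
    simp only [pvColZerosA, PySem.List.pyGetD_natCast, beq_iff_eq]
    by_cases h0 : r.getD c 0 = 0
    · rw [if_pos h0]
      cases j with
      | zero =>
        simp only [List.getD_cons_zero, List.length_cons]
        constructor
        · intro h; have := colZerosA_nonneg rs (c : Int); omega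
        · rintro ⟨-, -, h3⟩
          exact absurd h0 (h3 (by omega))
      | succ j' =>
        have : pvColZerosA rs (c : Int) + 1 = ((j' + 1 : Nat) : Int) ↔
            pvColZerosA rs (c : Int) = (j' : Int) := by push_cast; omega
        rw [this, ih j']
        constructor
        · rintro ⟨h1, h2, h3⟩
          refine ⟨by simpa using Nat.succ_le_succ h1, ?_, ?_⟩
          · intro k hk
            cases k with
            | zero => simpa using h0
            | succ k' => simpa using h2 k' (by omega)
          · intro h; simpa using h3 (by simpa using Nat.lt_of_succ_lt_succ h)
        · rintro ⟨h1, h2, h3⟩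
          refine ⟨by simpa [List.length_cons] using h1, ?_, ?_⟩
          · intro k hk; simpa using h2 (k + 1) (by omega)
          · intro h; simpa using h3 (by simp [List.length_cons]; omega)
    · rw [if_neg h0]
      constructor
      · intro h
        have hj0 : j = 0 := by omega
        subst hj0
        exact ⟨by omega, by omega, fun _ => by simpa using h0⟩
      · rintro ⟨h1, h2, h3⟩
        cases j with
        | zero => rfl
        | succ j' => exact absurd (by simpa using h2 0 (by omega)) h0

-- A's outer loop over range(a, a+n) with threaded counter = every column count equals its index
lemma loopA_true_iff (m : List (List Int)) :
    ∀ (n : Nat) (a : Int),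
      (pvLoopA m (PySem.List.pyRange a (a + (n : Int)) 1) (a - 1) = true ↔
        ∀ k : Nat, k < n → pvColZerosA m (a + (k : Int)) = a + (k : Int)) := by
  intro n
  induction n with
  | zero =>
    intro a
    rw [PySem.List.pyRange_one_eq_nil (by omega)]
    simp [pvLoopA]
  | succ p ih =>
    intro a
    rw [PySem.List.pyRange_one_cons (by omega)]
    simp only [pvLoopA]
    by_cases hz : pvColZerosA m a = a
    · rw [if_neg (by omega)]
      have h1 : (a : Int) + ((p : Nat) : Int) + 1 = a + 1 + ((p : Nat) : Int) := by omega
      have h2 : pvColZerosA m a = a + 1 - 1 := by omega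
      rw [hz]
      have := ih (a + 1)
      rw [show (a + 1 - 1 : Int) = a by omega] at this
      rw [show a + ((p + 1 : Nat) : Int) = a + 1 + ((p : Nat) : Int) by push_cast; omega, this]
      constructor
      · intro h k hk
        cases k with
        | zero => simpa using hz
        | succ k' =>
          have := h k' (by omega)
          rw [show a + ((k' + 1 : Nat) : Int) = a + 1 + ((k' : Nat) : Int) by push_cast; omega]
          exact this
      · intro h k hk
        have := h (k + 1) (by omega)
        rw [show a + ((k + 1 : Nat) : Int) = a + 1 + ((k : Nat) : Int) by push_cast; omega] at this
        exact this
    · rw [if_pos (by omega)]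
      simp only [Bool.false_eq_true, false_iff]
      intro h
      exact hz (by have := h 0 (by omega); simpa using this)

-- the super-diagonal slice is all-zero iff every padded entry right of the diagonal is zero
lemma slice_any_false_iff (xs : List Int) (a b : Nat) :
    ((PySem.List.slice xs (some ((a : Int))) (some ((b : Int)))).any (fun x => decide (x ≠ 0)) = false) ↔
      ∀ j : Nat, a ≤ j → j < b → xs.getD j 0 = 0 := by
  rw [PySem.List.slice_natCast]
  have hlen : ((xs.drop a).take (b - a)).length = min (b - a) (xs.length - a) := by
    simp [List.length_take, List.length_drop]
  have key : ∀ (t : Nat) (h : t < ((xs.drop a).take (b - a)).length),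
      ((xs.drop a).take (b - a))[t] = xs.getD (a + t) 0 := by
    intro t h
    have h2 : a + t < xs.length := by rw [hlen] at h; omega
    rw [List.getElem_take, List.getElem_drop, List.getD_eq_getElem _ _ h2]
  rw [List.any_eq_false]
  constructor
  · intro h j hja hjb
    by_cases hl : j < xs.length
    · have ht : j - a < ((xs.drop a).take (b - a)).length := by rw [hlen]; omega
      have hkey := key (j - a) ht
      rw [show a + (j - a) = j by omega] at hkey
      have hm := List.getElem_mem ht
      rw [hkey] at hm
      have := h _ hm
      simpa using this
    · exact List.getD_eq_default _ _ (by omega)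
  · intro h x hx
    obtain ⟨t, ht, rfl⟩ := List.mem_iff_getElem.mp hx
    have h2 : a + t < b := by rw [hlen] at ht; omega
    have h3 := h (a + t) (by omega) h2
    rw [key t ht, h3]
    simp

-- characterisation of B's row loop
lemma rowsB_true_iff (rows : List (List Int)) :
    ∀ (i0 c : Nat),
      (pvRowsB rows (i0 : Int) (c : Int) = true ↔
        ∀ k : Nat, k < rows.length →
          ((i0 + k < c → (rows.getD k []).getD (i0 + k) 0 ≠ 0) ∧
           (∀ j : Nat, i0 + k < j → j < c → (rows.getD k []).getD j 0 = 0))) := by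
  induction rows with
  | nil => intro i0 c; simp [pvRowsB]
  | cons fila rs ih =>
    intro i0 c
    simp only [pvRowsB]
    by_cases hd : (i0 : Int) < (c : Int) ∧ PySem.List.pyGetD fila (i0 : Int) 0 = 0
    · rw [if_pos hd]
      simp only [Bool.false_eq_true, false_iff]
      intro h
      have hdiag := (h 0 (by simp)).1
      simp only [Nat.add_zero, List.getD_cons_zero] at hdiag
      obtain ⟨hc, h0⟩ := hd
      rw [PySem.List.pyGetD_natCast] at h0
      exact hdiag (by exact_mod_cast hc) h0
    · rw [if_neg hd]
      have hcast : ((i0 : Int) + 1) = (((i0 + 1 : Nat) : Int)) := by push_cast; ring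
      by_cases hs : (PySem.List.slice fila (some ((i0 : Int) + 1)) (some (c : Int))).any
          (fun x => decide (x ≠ 0)) = true
      · rw [if_pos hs]
        simp only [Bool.false_eq_true, false_iff]
        intro h
        have hall := (h 0 (by simp)).2
        simp only [Nat.add_zero, List.getD_cons_zero] at hall
        have hfalse : (PySem.List.slice fila (some (((i0 + 1 : Nat) : Int))) (some ((c : Int)))).any
            (fun x => decide (x ≠ 0)) = false := by
          rw [slice_any_false_iff]
          intro j hj1 hj2
          exact hall j (by omega) hj2
        rw [← hcast, hs] at hfalse
        exact absurd hfalse (by simp)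
      · rw [if_neg hs]
        have hs' : ∀ j : Nat, i0 < j → j < c → fila.getD j 0 = 0 := by
          have hfalse : (PySem.List.slice fila (some (((i0 + 1 : Nat) : Int))) (some ((c : Int)))).any
              (fun x => decide (x ≠ 0)) = false := by
            rw [← hcast]; exact Bool.eq_false_iff.mpr hs
          have := (slice_any_false_iff fila (i0 + 1) c).mp hfalse
          intro j h1 h2; exact this j (by omega) h2
        have hdiag : (i0 : Nat) < c → fila.getD i0 0 ≠ 0 := by
          intro hc h0
          exact hd ⟨by exact_mod_cast hc, by rw [PySem.List.pyGetD_natCast]; exact h0⟩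
        rw [hcast, ih (i0 + 1) c]
        constructor
        · intro h k hk
          cases k with
          | zero =>
            refine ⟨fun hc => ?_, fun j h1 h2 => ?_⟩
            · simpa using hdiag (by omega)
            · simpa using hs' j (by omega) h2
          | succ k' =>
            have hk' := h k' (by simpa using Nat.lt_of_succ_lt_succ hk)
            refine ⟨fun hc => ?_, fun j h1 h2 => ?_⟩
            · have := hk'.1 (by omega)
              simpa [show i0 + 1 + k' = i0 + (k' + 1) by omega] using this
            · have := hk'.2 j (by omega) h2
              simpa using this
        · intro h k hk
          have hk1 := h (k + 1) (by simpa using Nat.succ_lt_succ hk)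
          refine ⟨fun hc => ?_, fun j h1 h2 => ?_⟩
          · have := hk1.1 (by omega)
            simpa [show i0 + (k + 1) = i0 + 1 + k by omega] using this
          · have := hk1.2 j (by omega) h2
            simpa using this

-- the two ports agree, stated over the head row's length
lemma pv_ports_agree (m : List (List Int)) :
    pvLoopA m (PySem.List.pyRange 0 (((m.headD []).length : Nat) : Int) 1) (-1) =
      (if (((m.headD []).length : Nat) : Int) > ((m.length : Nat) : Int) + 1 then false
       else pvRowsB m 0 (((m.headD []).length : Nat) : Int)) := by
  set Cn := (m.headD []).length with hCn
  set F := m.length with hF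
  have hA : (pvLoopA m (PySem.List.pyRange 0 ((Cn : Nat) : Int) 1) (-1) = true) ↔
      ∀ k : Nat, k < Cn → pvColZerosA m ((k : Nat) : Int) = ((k : Nat) : Int) := by
    have := loopA_true_iff m Cn 0
    rw [show ((0 : Int) + ((Cn : Nat) : Int)) = ((Cn : Nat) : Int) by ring,
        show ((0 : Int) - 1) = (-1 : Int) by ring] at this
    simpa using this
  by_cases hbound : Cn > F + 1
  · rw [if_pos (by omega)]
    have hnot : ¬ (∀ k : Nat, k < Cn → pvColZerosA m ((k : Nat) : Int) = ((k : Nat) : Int)) := by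
      intro h
      have h1 := h (F + 1) (by omega)
      have h2 := colZerosA_le m (((F + 1 : Nat) : Int))
      rw [← hF] at h2
      push_cast at h1 h2
      omega
    have := (not_iff_not.mpr hA).mpr hnot
    simpa using this
  · rw [if_neg (by omega)]
    have hB := rowsB_true_iff m 0 Cn
    have hiff : (∀ k : Nat, k < Cn → pvColZerosA m ((k : Nat) : Int) = ((k : Nat) : Int)) ↔
        (∀ k : Nat, k < m.length →
          ((0 + k < Cn → (m.getD k []).getD (0 + k) 0 ≠ 0) ∧
           (∀ j : Nat, 0 + k < j → j < Cn → (m.getD k []).getD j 0 = 0))) := by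
      constructor
      · intro h k hk
        constructor
        · intro hc
          have := ((colZerosA_eq_iff m k k).mp (h k (by omega))).2.2
          simpa using this (by omega)
        · intro j h1 h2
          have := ((colZerosA_eq_iff m j j).mp (h j (by omega))).2.1
          exact this k (by omega)
      · intro h j hj
        rw [colZerosA_eq_iff m j j]
        refine ⟨by omega, fun k hk => ?_, fun hjF => ?_⟩
        · exact (h k (by omega)).2 j (by omega) (by omega)
        · have := (h j (by omega)).1 (by omega)
          simpa using this
    have hfinal : (pvLoopA m (PySem.List.pyRange 0 ((Cn : Nat) : Int) 1) (-1) = true) ↔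
        (pvRowsB m ((0 : Nat) : Int) ((Cn : Nat) : Int) = true) := hA.trans (hiff.trans hB.symm)
    rw [show ((0 : Nat) : Int) = (0 : Int) by simp] at hfinal
    cases h1 : pvLoopA m (PySem.List.pyRange 0 ((Cn : Nat) : Int) 1) (-1) <;>
      cases h2 : pvRowsB m (0 : Int) ((Cn : Nat) : Int) <;> simp_all

-- ===== VERDICT (by name: the statement is the Claim_ definition above) =====
theorem es_escalonada_columnas_spec : Claim_equal_es_escalonada_columnas := by
  intro matriz hDom hPre
  clear hDom hPre
  unfold Spec_es_escalonada_columnas es_escalonada_columnas es_escalonada_columnas_alt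
  cases matriz with
  | nil => exact pv_ports_agree []
  | cons r rs => exact pv_ports_agree (r :: rs)
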